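-- pv_equiv track=rewrite | github.com/joonion/boj | Chap.34.동적계획법/2579.계단오르기/solve.py | solve
-- ===== SOURCE A (Python) =====
-- def solve(n, p):
--     D = [0] * (n + 1)
--     if n == 1:
--         return p[n]
--     elif n == 2:
--         return p[n - 1] + p[n]
--     else:
--         D[1] = p[1]
--         D[2] = p[1] + p[2]
--         for i in range(3, n + 1):
--             D[i] = p[i] + max(D[i-2], D[i-3] + p[i-1])
--         return D[n]
-- ===== SOURCE B (Python) =====
-- def solve(n, p):
--     if n == 1:
--         return p[n]
--     if n == 2:
--         return p[n - 1] + p[n]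
--     # Two-state DP on consecutive-step parity:
--     # one = best score stepping on the current stair AND the previous one,
--     # two = best score stepping on the current stair after skipping the previous one.
--     one, two = p[2] + p[3], p[1] + p[3]
--     if n == 3:
--         return max(one, two)
--     one_prev, two_prev = one, two
--     one, two = p[4] + two, p[1] + p[2] + p[4]
--     for i in range(5, n + 1):
--         one_prev, two_prev, one, two = one, two, p[i] + two, p[i] + max(one_prev, two_prev)
--     return max(one, two)
-- ===== Notes on version B (the rewrite author's own statement) =====
-- stated objective: alternative
-- what changed: B replaces A's single DP array with back-reaching accesses D[i-2], D[i-3]+p[i-1] by a two-state DP on consecutive-step parity (one[i] = best stepping on stairs i and i-1, two[i] = best stepping on i after skipping i-1, with one[i]=p[i]+two[i-1] and two[i]=p[i]+max(one[i-2],two[i-2])), carried in O(1) rolling scalars and returning max(one[n],two[n]).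
import Mathlib
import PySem

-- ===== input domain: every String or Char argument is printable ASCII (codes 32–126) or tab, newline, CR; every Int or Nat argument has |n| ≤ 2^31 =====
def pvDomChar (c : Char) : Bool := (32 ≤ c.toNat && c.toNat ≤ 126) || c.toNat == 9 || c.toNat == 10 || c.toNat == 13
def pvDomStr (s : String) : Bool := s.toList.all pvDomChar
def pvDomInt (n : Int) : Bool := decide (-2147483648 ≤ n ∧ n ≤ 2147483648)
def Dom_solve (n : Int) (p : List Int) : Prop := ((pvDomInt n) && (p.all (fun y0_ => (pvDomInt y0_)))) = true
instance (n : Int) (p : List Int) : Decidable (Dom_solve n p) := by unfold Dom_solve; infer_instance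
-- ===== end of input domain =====

-- B replaces A's back-reaching DP array by a two-state DP on consecutive-step parity
-- (one = best ending with two consecutive steps, two = best ending after a skip), O(1) space.

-- ===== PORT A =====
def solve (n : Int) (p : List Int) : Int :=
  let D : List Int := List.replicate (n + 1).toNat 0
  if n = 1 then PySem.List.pyGetD p n 0
  else if n = 2 then PySem.List.pyGetD p (n - 1) 0 + PySem.List.pyGetD p n 0
  else
    let D := D.set 1 (PySem.List.pyGetD p 1 0)
    let D := D.set 2 (PySem.List.pyGetD p 1 0 + PySem.List.pyGetD p 2 0)
    let D := (PySem.List.pyRange 3 (n + 1) 1).foldl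
      (fun D i => D.set i.toNat
        (PySem.List.pyGetD p i 0 +
          max (PySem.List.pyGetD D (i - 2) 0)
              (PySem.List.pyGetD D (i - 3) 0 + PySem.List.pyGetD p (i - 1) 0))) D
    PySem.List.pyGetD D n 0

-- ===== PORT B =====
def solve_alt (n : Int) (p : List Int) : Int :=
  if n = 1 then PySem.List.pyGetD p n 0
  else if n = 2 then PySem.List.pyGetD p (n - 1) 0 + PySem.List.pyGetD p n 0
  else
    let one := PySem.List.pyGetD p 2 0 + PySem.List.pyGetD p 3 0
    let two := PySem.List.pyGetD p 1 0 + PySem.List.pyGetD p 3 0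
    if n = 3 then max one two
    else
      let st := (PySem.List.pyRange 5 (n + 1) 1).foldl
        (fun (st : Int × Int × Int × Int) i =>
          (st.2.2.1, st.2.2.2,
           PySem.List.pyGetD p i 0 + st.2.2.2,
           PySem.List.pyGetD p i 0 + max st.1 st.2.1))
        (one, two, PySem.List.pyGetD p 4 0 + two,
          PySem.List.pyGetD p 1 0 + PySem.List.pyGetD p 2 0 + PySem.List.pyGetD p 4 0)
      max st.2.2.1 st.2.2.2

-- ===== PRECONDITION & SPEC =====
-- Pre_: exactly the inputs where A returns (A raises IndexError when n ≤ 0 or len(p) < n+1).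
def Pre_solve (n : Int) (p : List Int) : Prop := 1 ≤ n ∧ n + 1 ≤ (p.length : Int)
instance (n : Int) (p : List Int) : Decidable (Pre_solve n p) := by unfold Pre_solve; infer_instance
def pvWitness_solve : Int × List Int := (4, [0, 10, 20, 15, 25])

def Spec_solve (n : Int) (p : List Int) (out : Int) : Prop := out = solve_alt n p
instance (n : Int) (p : List Int) (out : Int) : Decidable (Spec_solve n p out) := by unfold Spec_solve; infer_instance

-- ===== CLAIM (what is proved, stated in full; the proofs are below) =====
def Claim_equal_solve : Prop := ∀ (n : Int) (p : List Int), Dom_solve n p → Pre_solve n p → Spec_solve n p (solve n p)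

-- ===== LEMMAS AND PROOFS =====

-- Reference value of A's array entry D[k].
def Dval (p : List Int) : Nat → Int
  | 0 => 0
  | 1 => PySem.List.pyGetD p 1 0
  | 2 => PySem.List.pyGetD p 1 0 + PySem.List.pyGetD p 2 0
  | (k + 3) =>
      PySem.List.pyGetD p ((k : Int) + 3) 0 +
        max (Dval p (k + 1)) (Dval p k + PySem.List.pyGetD p ((k : Int) + 2) 0)

-- A-side loop invariant.
lemma loopA (p : List Int) (L : Nat) :
    ∀ (m k : Nat) (D : List Int), D.length = L → 3 + k + m ≤ L →
      (∀ j : Nat, j < 3 + k → D.getD j 0 = Dval p j) →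
      (((PySem.List.pyRange ((3 + k : Nat) : Int) ((3 + k + m : Nat) : Int) 1).foldl
        (fun D i => D.set i.toNat
          (PySem.List.pyGetD p i 0 +
            max (PySem.List.pyGetD D (i - 2) 0)
                (PySem.List.pyGetD D (i - 3) 0 + PySem.List.pyGetD p (i - 1) 0))) D).length = L ∧
       ∀ j : Nat, j < 3 + k + m →
        ((PySem.List.pyRange ((3 + k : Nat) : Int) ((3 + k + m : Nat) : Int) 1).foldl
          (fun D i => D.set i.toNat
            (PySem.List.pyGetD p i 0 +
              max (PySem.List.pyGetD D (i - 2) 0)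
                  (PySem.List.pyGetD D (i - 3) 0 + PySem.List.pyGetD p (i - 1) 0))) D).getD j 0
          = Dval p j) := by
  intro m
  induction m with
  | zero =>
      intro k D hlen hle hinv
      rw [PySem.List.pyRange_one_eq_nil (by omega)]
      simpa using ⟨hlen, by simpa using hinv⟩
  | succ m ih =>
      intro k D hlen hle hinv
      rw [PySem.List.pyRange_one_cons (by exact_mod_cast (by omega : (3 + k : Int) < (3 + k + (m+1) : Nat)))]
      simp only [List.foldl_cons]
      set D1 := D.set ((3 + k : Nat) : Int).toNat
        (PySem.List.pyGetD p ((3 + k : Nat) : Int) 0 +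
          max (PySem.List.pyGetD D (((3 + k : Nat) : Int) - 2) 0)
              (PySem.List.pyGetD D (((3 + k : Nat) : Int) - 3) 0 +
                PySem.List.pyGetD p (((3 + k : Nat) : Int) - 1) 0)) with hD1
      have hlen1 : D1.length = L := by simp [hD1, hlen]
      have hinv1 : ∀ j : Nat, j < 3 + (k + 1) → D1.getD j 0 = Dval p j := by
        intro j hj
        by_cases hjk : j = 3 + k
        · subst hjk
          have hlt : 3 + k < D.length := by omega
          have h2 : (((3 + k : Nat) : Int) - 2) = ((k + 1 : Nat) : Int) := by push_cast; ring
          have h3 : (((3 + k : Nat) : Int) - 3) = ((k : Nat) : Int) := by push_cast; ring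
          have h1 : (((3 + k : Nat) : Int) - 1) = ((k + 2 : Nat) : Int) := by push_cast; ring
          have hp3 : ((3 + k : Nat) : Int) = ((k : Int) + 3) := by push_cast; ring
          rw [hD1]
          simp only [Int.toNat_natCast]
          rw [List.getD_eq_getElem?_getD, List.getElem?_set_self hlt]
          rw [h2, h3, h1, hp3]
          simp only [Option.getD_some, PySem.List.pyGetD_natCast]
          rw [hinv (k + 1) (by omega), hinv k (by omega)]
          have e9 : 3 + k = k + 3 := by omega
          have e10 : ((k : Int) + 2) = ((k + 2 : Nat) : Int) := by push_cast; ring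
          rw [e9]
          simp only [Dval, e10, PySem.List.pyGetD_natCast]
        · rw [hD1]
          simp only [Int.toNat_natCast]
          rw [List.getD_eq_getElem?_getD, List.getElem?_set_ne (by omega), ← List.getD_eq_getElem?_getD]
          exact hinv j (by omega)
      have hc1 : ((3 + k : Nat) : Int) + 1 = ((3 + (k + 1) : Nat) : Int) := by push_cast; ring
      have hc2 : ((3 + k + (m + 1) : Nat) : Int) = ((3 + (k + 1) + m : Nat) : Int) := by push_cast; ring
      rw [hc1, hc2]
      have := ih (k + 1) D1 hlen1 (by omega) hinv1
      refine ⟨this.1, fun j hj => this.2 j (by omega)⟩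

-- A's else-branch computes Dval.
lemma solveA_eq (n : Int) (p : List Int) (h3 : 3 ≤ n) (_hl : n + 1 ≤ (p.length : Int)) :
    solve n p = Dval p n.toNat := by
  have hn1 : n ≠ 1 := by omega
  have hn2 : n ≠ 2 := by omega
  unfold solve
  simp only [hn1, hn2, if_false]
  set D0 := ((List.replicate (n + 1).toNat 0).set 1 (PySem.List.pyGetD p 1 0)).set 2
    (PySem.List.pyGetD p 1 0 + PySem.List.pyGetD p 2 0) with hD0
  have hlen0 : D0.length = (n + 1).toNat := by simp [hD0]
  have hinv0 : ∀ j : Nat, j < 3 + 0 → D0.getD j 0 = Dval p j := by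
    intro j hj
    interval_cases j <;>
      simp [hD0, List.getD_eq_getElem?_getD, (by omega : (0:Nat) < (n+1).toNat), (by omega : (1:Nat) < (n+1).toNat),
        (by omega : (2:Nat) < (n+1).toNat), Dval]
  have hm : 3 + 0 + ((n + 1).toNat - 3) = (n + 1).toNat := by omega
  have hc3 : ((3 + 0 : Nat) : Int) = (3 : Int) := by norm_num
  have hcn : ((3 + 0 + ((n + 1).toNat - 3) : Nat) : Int) = n + 1 := by
    rw [hm]; omega
  have := loopA p (n + 1).toNat ((n + 1).toNat - 3) 0 D0 hlen0 (by omega) hinv0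
  rw [hc3, hcn] at this
  have hfin := this.2 n.toNat (by omega)
  rw [PySem.List.pyGetD_of_nonneg]
  · exact hfin
  · omega

-- B-side reference values: Oval k = best stepping on stairs k-1 and k, Tval k = stepping on k, skipping k-1,
-- both expressed through A's Dval so the two DPs can be compared.
def Oval (p : List Int) (k : Nat) : Int :=
  PySem.List.pyGetD p (k : Int) 0 + PySem.List.pyGetD p ((k : Int) - 1) 0 + Dval p (k - 3)
def Tval (p : List Int) (k : Nat) : Int :=
  PySem.List.pyGetD p (k : Int) 0 + Dval p (k - 2)

lemma Dval_max (p : List Int) (k : Nat) :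
    Dval p (k + 3) = max (Tval p (k + 3)) (Oval p (k + 3)) := by
  have e1 : ((k + 3 : Nat) : Int) = (k : Int) + 3 := by push_cast; ring
  have e2 : (k : Int) + 3 - 1 = (k : Int) + 2 := by ring
  have e3 : k + 3 - 2 = k + 1 := by omega
  have e4 : k + 3 - 3 = k := by omega
  simp only [Dval, Tval, Oval, e1, e2, e3, e4]
  simp only [max_def]
  split_ifs <;> omega

-- B-side loop invariant.
lemma loopB (p : List Int) :
    ∀ (m j : Nat), 4 ≤ j →
      ((PySem.List.pyRange ((j + 1 : Nat) : Int) ((j + 1 + m : Nat) : Int) 1).foldl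
        (fun (st : Int × Int × Int × Int) i =>
          (st.2.2.1, st.2.2.2,
           PySem.List.pyGetD p i 0 + st.2.2.2,
           PySem.List.pyGetD p i 0 + max st.1 st.2.1))
        (Oval p (j - 1), Tval p (j - 1), Oval p j, Tval p j))
      = (Oval p (j + m - 1), Tval p (j + m - 1), Oval p (j + m), Tval p (j + m)) := by
  intro m
  induction m with
  | zero =>
      intro j hj
      rw [PySem.List.pyRange_one_eq_nil (by omega)]
      simp
  | succ m ih =>
      intro j hj
      rw [PySem.List.pyRange_one_cons (by exact_mod_cast (by omega : ((j + 1 : Nat) : Int) < ((j + 1 + (m + 1) : Nat) : Int)))]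
      simp only [List.foldl_cons]
      have hstep :
          ((Oval p (j - 1), Tval p (j - 1), Oval p j, Tval p j).2.2.1,
           (Oval p (j - 1), Tval p (j - 1), Oval p j, Tval p j).2.2.2,
           PySem.List.pyGetD p ((j + 1 : Nat) : Int) 0 +
             (Oval p (j - 1), Tval p (j - 1), Oval p j, Tval p j).2.2.2,
           PySem.List.pyGetD p ((j + 1 : Nat) : Int) 0 +
             max (Oval p (j - 1), Tval p (j - 1), Oval p j, Tval p j).1
                 (Oval p (j - 1), Tval p (j - 1), Oval p j, Tval p j).2.1)
          = (Oval p (j + 1 - 1), Tval p (j + 1 - 1), Oval p (j + 1), Tval p (j + 1)) := by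
        have ej : j + 1 - 1 = j := by omega
        have eo1 : ((j + 1 : Nat) : Int) - 1 = ((j : Nat) : Int) := by push_cast; ring
        have eo2 : j + 1 - 3 = j - 2 := by omega
        have et2 : j + 1 - 2 = j - 1 := by omega
        have hD : Dval p (j - 1) = max (Tval p (j - 1)) (Oval p (j - 1)) := by
          have e5 : j - 1 = (j - 4) + 3 := by omega
          rw [e5]; exact Dval_max p (j - 4)
        have hO : PySem.List.pyGetD p ((j + 1 : Nat) : Int) 0 + Tval p j = Oval p (j + 1) := by
          simp only [Oval, Tval, eo1, eo2]
          omega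
        have hT : PySem.List.pyGetD p ((j + 1 : Nat) : Int) 0 + max (Oval p (j - 1)) (Tval p (j - 1))
            = Tval p (j + 1) := by
          simp only [Tval, et2, hD, max_comm]
        simp only [ej, hO, hT]
      rw [hstep]
      have hc1 : ((j + 1 : Nat) : Int) + 1 = (((j + 1) + 1 : Nat) : Int) := by push_cast; ring
      have hc2 : ((j + 1 + (m + 1) : Nat) : Int) = (((j + 1) + 1 + m : Nat) : Int) := by push_cast; ring
      rw [hc1, hc2]
      have := ih (j + 1) (by omega)
      rw [this]
      have e6 : j + 1 + m - 1 = j + (m + 1) - 1 := by omega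
      have e7 : j + 1 + m = j + (m + 1) := by omega
      rw [e6, e7]

-- B's else-branch also computes Dval.
lemma solveB_eq (n : Int) (p : List Int) (h3 : 3 ≤ n) (_hl : n + 1 ≤ (p.length : Int)) :
    solve_alt n p = Dval p n.toNat := by
  have hn1 : n ≠ 1 := by omega
  have hn2 : n ≠ 2 := by omega
  unfold solve_alt
  simp only [hn1, hn2, if_false]
  by_cases hn3 : n = 3
  · subst hn3
    show max (PySem.List.pyGetD p 2 0 + PySem.List.pyGetD p 3 0)
             (PySem.List.pyGetD p 1 0 + PySem.List.pyGetD p 3 0) = Dval p (3 : Int).toNat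
    have : (3 : Int).toNat = 0 + 3 := by decide
    rw [this]
    simp only [Dval, Nat.cast_zero, zero_add, max_def]
    split_ifs <;> omega
  · simp only [if_neg hn3]
    have h4 : 4 ≤ n := by omega
    have h3O : PySem.List.pyGetD p 2 0 + PySem.List.pyGetD p 3 0 = Oval p 3 := by
      simp only [Oval]
      norm_num [Dval]
      try omega
    have h3T : PySem.List.pyGetD p 1 0 + PySem.List.pyGetD p 3 0 = Tval p 3 := by
      simp only [Tval]
      norm_num [Dval]
      try omega
    have h4O : PySem.List.pyGetD p 4 0 + Tval p 3 = Oval p 4 := by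
      simp only [Oval, Tval]
      norm_num [Dval]
      try omega
    have h4T : PySem.List.pyGetD p 1 0 + PySem.List.pyGetD p 2 0 + PySem.List.pyGetD p 4 0
        = Tval p 4 := by
      simp only [Tval]
      norm_num [Dval]
      try omega
    have hl := loopB p (n.toNat - 4) 4 (by norm_num)
    have e31 : (4 - 1 : Nat) = 3 := rfl
    rw [e31] at hl
    have hr1 : (5 : Int) = ((4 + 1 : Nat) : Int) := by norm_num
    have hr2 : n + 1 = ((4 + 1 + (n.toNat - 4) : Nat) : Int) := by push_cast; omega
    rw [h3O, h3T, h4O, h4T, hr1, hr2, hl]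
    have e8 : 4 + (n.toNat - 4) = n.toNat := by omega
    rw [e8]
    have e9 : n.toNat = (n.toNat - 3) + 3 := by omega
    show max (Oval p n.toNat) (Tval p n.toNat) = Dval p n.toNat
    rw [e9, Dval_max, max_comm]

-- ===== VERDICT (by name: the statement is the Claim_ definition above) =====
theorem solve_spec : Claim_equal_solve := by
  intro n p hdom hpre
  unfold Spec_solve
  obtain ⟨h1, hl⟩ := hpre
  by_cases hn1 : n = 1
  · simp [solve, solve_alt, hn1]
  · by_cases hn2 : n = 2
    · simp [solve, solve_alt, hn2]
    · have h3 : 3 ≤ n := by omega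
      rw [solveA_eq n p h3 hl, solveB_eq n p h3 hl]
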